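-- pv_equiv track=rewrite | github.com/cry-crystal-cry/AOIS | lab3/Karnaugh5.py | cut_cells_list
-- ===== SOURCE A (Python) =====
-- def cut_cells_list(index_list: list[tuple], start_or_end: bool):
--     degrees = [1, 2, 4, 8]
--     while len(index_list) not in degrees:
--         if start_or_end:
--             index_list.pop(0)
--         else:
--             index_list.pop()
--     return index_list
-- ===== SOURCE B (Python) =====
-- def cut_cells_list(index_list: list[tuple], start_or_end: bool):
--     n = len(index_list)
--     target = [d for d in [1, 2, 4, 8] if d <= n][-1]
--     if start_or_end:
--         del index_list[:n - target]
--     else: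
--         del index_list[target:]
--     return index_list
-- ===== Notes on version B (the rewrite author's own statement) =====
-- stated objective: simpler
-- what changed: Replaces the repeated pop loop by computing the target power-of-two length in closed form and deleting the excess with one slice del.
import Mathlib
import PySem

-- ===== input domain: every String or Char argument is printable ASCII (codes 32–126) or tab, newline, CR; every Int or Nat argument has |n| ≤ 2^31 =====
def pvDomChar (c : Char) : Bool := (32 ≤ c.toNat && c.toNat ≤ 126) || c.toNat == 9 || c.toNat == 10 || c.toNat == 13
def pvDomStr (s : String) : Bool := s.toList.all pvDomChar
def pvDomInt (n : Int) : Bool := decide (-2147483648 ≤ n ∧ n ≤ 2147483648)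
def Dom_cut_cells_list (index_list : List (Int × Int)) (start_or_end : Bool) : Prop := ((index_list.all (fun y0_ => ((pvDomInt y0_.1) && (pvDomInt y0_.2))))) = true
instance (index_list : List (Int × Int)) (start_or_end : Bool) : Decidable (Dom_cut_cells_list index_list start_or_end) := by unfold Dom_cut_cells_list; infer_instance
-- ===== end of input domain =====

-- B computes the target power-of-two length in closed form and trims with one slice deletion,
-- instead of A's repeated pop loop (return value; both mutate the argument list identically in Python).


-- ===== PORT A =====
-- while len not in [1,2,4,8]: pop(0) or pop().  On [] Python's pop raises IndexError
-- (excluded by Pre_); the port returns [] there only to be total.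
def cut_cells_list (index_list : List (Int × Int)) (start_or_end : Bool) : List (Int × Int) :=
  if index_list.length = 1 ∨ index_list.length = 2 ∨ index_list.length = 4 ∨ index_list.length = 8 then
    index_list
  else
    match h : index_list with
    | [] => []
    | _ :: _ =>
      if start_or_end then cut_cells_list index_list.tail start_or_end
      else cut_cells_list index_list.dropLast start_or_end
termination_by index_list.length
decreasing_by
  · simp [h]
  · simp [h, List.length_dropLast]

-- ===== PORT B =====
-- target = [d for d in [1,2,4,8] if d <= n][-1]; del excess from front or back.
-- [-1] on the empty candidate list raises IndexError in Python (excluded by Pre_); none-branch returns [] for totality.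
def cut_cells_list_alt (index_list : List (Int × Int)) (start_or_end : Bool) : List (Int × Int) :=
  let n := index_list.length
  match ((([1, 2, 4, 8] : List Nat).filter (fun d => d ≤ n)).getLast?) with
  | none => []
  | some target =>
    if start_or_end then index_list.drop (n - target)
    else index_list.take target

-- ===== PRECONDITION & SPEC =====
-- Pre_ excludes only the empty list, on which both Pythons raise IndexError.
def Pre_cut_cells_list (index_list : List (Int × Int)) (start_or_end : Bool) : Prop := index_list ≠ []
instance (index_list : List (Int × Int)) (start_or_end : Bool) : Decidable (Pre_cut_cells_list index_list start_or_end) := by unfold Pre_cut_cells_list; infer_instance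
def pvWitness_cut_cells_list : (List (Int × Int)) × Bool := ([(1, 2), (3, 4), (5, 6)], true)

def Spec_cut_cells_list (index_list : List (Int × Int)) (start_or_end : Bool) (out : List (Int × Int)) : Prop := out = cut_cells_list_alt index_list start_or_end
instance (index_list : List (Int × Int)) (start_or_end : Bool) (out : List (Int × Int)) : Decidable (Spec_cut_cells_list index_list start_or_end out) := by unfold Spec_cut_cells_list; infer_instance

-- ===== CLAIM (what is proved, stated in full; the proofs are below) =====
def Claim_equal_cut_cells_list : Prop := ∀ (index_list : List (Int × Int)) (start_or_end : Bool), Dom_cut_cells_list index_list start_or_end → Pre_cut_cells_list index_list start_or_end → Spec_cut_cells_list index_list start_or_end (cut_cells_list index_list start_or_end)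

-- ===== LEMMAS AND PROOFS =====

-- closed-form value of B's candidate-list last element
def pvTgt (n : Nat) : Nat := if 8 ≤ n then 8 else if 4 ≤ n then 4 else if 2 ≤ n then 2 else 1

theorem pvTgt_last (n : Nat) (hn : 1 ≤ n) :
    ((([1, 2, 4, 8] : List Nat).filter (fun d => d ≤ n)).getLast?) = some (pvTgt n) := by
  unfold pvTgt
  rcases Nat.lt_or_ge n 2 with h2 | h2
  · have : n = 1 := by omega
    subst this; decide
  · rcases Nat.lt_or_ge n 4 with h4 | h4
    · simp [List.filter, show 1 ≤ n by omega, h2,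
        show ¬ (4 ≤ n) by omega, show ¬ (8 ≤ n) by omega]
    · rcases Nat.lt_or_ge n 8 with h8 | h8
      · simp [List.filter, show 1 ≤ n by omega, h2, h4,
          show ¬ (8 ≤ n) by omega]
      · simp [List.filter, show 1 ≤ n by omega, h2, h4, h8]

theorem pvTgt_le (n : Nat) : pvTgt n ≤ max n 1 := by
  unfold pvTgt; split_ifs <;> omega

theorem pvAlt_eq (l : List (Int × Int)) (b : Bool) (hl : l ≠ []) :
    cut_cells_list_alt l b =
      if b then l.drop (l.length - pvTgt l.length) else l.take (pvTgt l.length) := by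
  have hn : 1 ≤ l.length := List.length_pos_of_ne_nil hl
  unfold cut_cells_list_alt
  simp [pvTgt_last _ hn]

theorem pv_main (n : Nat) : ∀ (l : List (Int × Int)) (b : Bool), l.length = n → l ≠ [] →
    cut_cells_list l b = cut_cells_list_alt l b := by
  induction n using Nat.strong_induction_on with
  | _ n ih =>
    intro l b hlen hne
    have hn : 1 ≤ n := hlen ▸ List.length_pos_of_ne_nil hne
    rw [pvAlt_eq l b hne, cut_cells_list.eq_def]
    by_cases hmem : l.length = 1 ∨ l.length = 2 ∨ l.length = 4 ∨ l.length = 8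
    · rw [if_pos hmem]
      have ht : pvTgt l.length = l.length := by
        unfold pvTgt; rcases hmem with h | h | h | h <;> rw [h] <;> decide
      cases b <;> simp [ht]
    · rw [if_neg hmem]
      obtain ⟨x, xs, rfl⟩ := List.exists_cons_of_ne_nil hne
      have hlen' : (x :: xs).length = n := hlen
      have hn2 : 2 ≤ n := by
        rcases Nat.lt_or_ge n 2 with h | h
        · exfalso; apply hmem; omega
        · exact h
      have hxs : xs ≠ [] := by
        intro h; subst h; simp at hlen'; omega
      have htl : (x :: xs).tail = xs := rfl
      have htgt : pvTgt ((x :: xs).length) = pvTgt n := by rw [hlen']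
      have htgt' : pvTgt n = pvTgt (n - 1) := by
        unfold pvTgt
        have h1 : ¬ (x :: xs).length = 1 ∧ ¬ (x :: xs).length = 2 ∧ ¬ (x :: xs).length = 4 ∧ ¬ (x :: xs).length = 8 := by
          push_neg at hmem; exact hmem
        rw [hlen'] at h1
        split_ifs <;> omega
      have htle : pvTgt (n - 1) ≤ n - 1 := by
        have := pvTgt_le (n - 1)
        have : pvTgt (n-1) ≤ max (n-1) 1 := this
        omega
      have hxlen : xs.length = n - 1 := by simp at hlen'; omega
      cases b with
      | true =>
        simp only [if_pos rfl, htl]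
        rw [ih (n - 1) (by omega) xs true hxlen hxs, pvAlt_eq xs true hxs, hxlen,
          htgt, htgt', hlen']
        have hge : 1 ≤ n - pvTgt (n - 1) := by omega
        rw [show n - pvTgt (n - 1) = (n - 1 - pvTgt (n - 1)) + 1 by omega]
        simp [List.drop_succ_cons]
      | false =>
        have hdl : (x :: xs).dropLast.length = n - 1 := by
          simp [List.length_dropLast, hlen']
        have hdlne : (x :: xs).dropLast ≠ [] := by
          intro h
          have := congrArg List.length h
          simp [hdl] at this; omega
        simp only [Bool.false_eq_true, if_neg]
        rw [ih (n - 1) (by omega) _ false hdl hdlne, pvAlt_eq _ false hdlne, hdl,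
          htgt, htgt']
        simp only [Bool.false_eq_true, if_neg]
        rw [List.dropLast_eq_take, List.take_take, hlen', Nat.min_eq_left htle]
        simp

-- ===== VERDICT (by name: the statement is the Claim_ definition above) =====
theorem cut_cells_list_spec : Claim_equal_cut_cells_list := by
  intro l b _ hpre
  unfold Spec_cut_cells_list
  exact pv_main l.length l b rfl hpre
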